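-- pv_equiv track=rewrite | github.com/carloscz17/subpalavra_python | main.py | subPalavra
-- ===== SOURCE A (Python) =====
-- def subPalavra (palavra, indiceI, indiceF):
--     sub = ""
--     count = 0
--     for x,y in enumerate(palavra):
--         if (x==(indiceI+count)):
--             count += 1
--             sub += y
--             if(x == indiceF):
--                 break
--     return sub
-- ===== SOURCE B (Python) =====
-- def subPalavra(palavra, indiceI, indiceF):
--     if indiceI < 0 or indiceI >= len(palavra):
--         return ""
--     if indiceF < indiceI or indiceF >= len(palavra):
--         return palavra[indiceI:]
--     return palavra[indiceI:indiceF + 1]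
-- ===== Notes on version B (the rewrite author's own statement) =====
-- stated objective: simpler
-- what changed: Replaced the counter-driven enumerate scan by closed-form slicing with two guards (empty result for an out-of-range start; palavra[indiceI:] when the break index is unreachable; otherwise palavra[indiceI:indiceF+1]).
import Mathlib
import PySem

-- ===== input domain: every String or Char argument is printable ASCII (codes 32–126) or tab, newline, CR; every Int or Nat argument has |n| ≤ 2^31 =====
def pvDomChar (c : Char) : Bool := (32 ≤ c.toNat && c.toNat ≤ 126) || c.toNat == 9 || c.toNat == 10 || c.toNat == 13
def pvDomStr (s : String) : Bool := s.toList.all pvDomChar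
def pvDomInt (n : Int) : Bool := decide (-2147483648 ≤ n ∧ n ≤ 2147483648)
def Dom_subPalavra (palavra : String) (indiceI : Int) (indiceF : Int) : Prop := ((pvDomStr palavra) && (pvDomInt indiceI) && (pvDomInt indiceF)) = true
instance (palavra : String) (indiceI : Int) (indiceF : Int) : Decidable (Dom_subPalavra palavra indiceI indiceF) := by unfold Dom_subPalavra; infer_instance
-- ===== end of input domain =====

-- B replaces A's counter-driven scan over enumerate(palavra) by closed-form slicing
-- with two guards (objective: simpler).

-- ===== PORT A =====
-- the for-loop with its break, over enumerate(palavra); state = (sub, count)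
def subPalavraLoop (items : List (Int × Char)) (sub : List Char) (count : Int)
    (indiceI : Int) (indiceF : Int) : List Char :=
  match items with
  | [] => sub
  | (x, y) :: rest =>
    if x = indiceI + count then
      -- count += 1; sub += y; then the break test
      if x = indiceF then sub ++ [y]
      else subPalavraLoop rest (sub ++ [y]) (count + 1) indiceI indiceF
    else subPalavraLoop rest sub count indiceI indiceF

def subPalavra (palavra : String) (indiceI : Int) (indiceF : Int) : String :=
  String.ofList (subPalavraLoop (PySem.List.enumerate palavra.toList 0) [] 0 indiceI indiceF)

-- ===== PORT B =====
def subPalavra_alt (palavra : String) (indiceI : Int) (indiceF : Int) : String :=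
  if indiceI < 0 ∨ indiceI ≥ (palavra.length : Int) then ""
  else if indiceF < indiceI ∨ indiceF ≥ (palavra.length : Int) then
    PySem.Str.slice palavra (some indiceI) none
  else PySem.Str.slice palavra (some indiceI) (some (indiceF + 1))

-- ===== PRECONDITION & SPEC =====
def Spec_subPalavra (palavra : String) (indiceI : Int) (indiceF : Int) (out : String) : Prop := out = subPalavra_alt palavra indiceI indiceF
instance (palavra : String) (indiceI : Int) (indiceF : Int) (out : String) : Decidable (Spec_subPalavra palavra indiceI indiceF out) := by unfold Spec_subPalavra; infer_instance

-- ===== CLAIM (what is proved, stated in full; the proofs are below) =====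
def Claim_equal_subPalavra : Prop := ∀ (palavra : String) (indiceI : Int) (indiceF : Int), Dom_subPalavra palavra indiceI indiceF → Spec_subPalavra palavra indiceI indiceF (subPalavra palavra indiceI indiceF)

-- ===== LEMMAS AND PROOFS =====

-- If the looked-for index is already below the current enumeration position,
-- the loop never matches again and returns the accumulator unchanged.
lemma loop_of_lt (l : List Char) (s : Int) (acc : List Char) (c : Int)
    (indiceI indiceF : Int) (h : indiceI + c < s) :
    subPalavraLoop (PySem.List.enumerate l s) acc c indiceI indiceF = acc := by
  induction l generalizing s with
  | nil => simp [PySem.List.enumerate_nil, subPalavraLoop]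
  | cons y rest ih =>
    rw [PySem.List.enumerate_cons, subPalavraLoop, if_neg (by omega)]
    exact ih (s + 1) (by omega)

-- Main characterisation of the loop when the looked-for index is at or beyond
-- the current enumeration position: it returns the accumulator followed by the
-- suffix starting at the looked-for index, cut after indiceF if that is reached.
lemma loop_of_le (l : List Char) (s : Int) (acc : List Char) (c : Int)
    (indiceI indiceF : Int) (h : s ≤ indiceI + c) :
    subPalavraLoop (PySem.List.enumerate l s) acc c indiceI indiceF =
      if indiceI + c < s + l.length then
        (if indiceF < indiceI + c ∨ indiceF ≥ s + l.length then
          acc ++ l.drop (indiceI + c - s).toNat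
        else
          acc ++ (l.drop (indiceI + c - s).toNat).take (indiceF - (indiceI + c) + 1).toNat)
      else acc := by
  induction l generalizing s acc c with
  | nil =>
    rw [PySem.List.enumerate_nil]
    simp only [subPalavraLoop, List.length_nil, Nat.cast_zero, add_zero]
    rw [if_neg (by omega)]
  | cons y rest ih =>
    rw [PySem.List.enumerate_cons, subPalavraLoop]
    simp only [List.length_cons, Nat.cast_add, Nat.cast_one]
    by_cases hm : s = indiceI + c
    · rw [if_pos hm]
      by_cases hb : s = indiceF
      · -- the break fires on this element
        rw [if_pos hb, show (indiceI + c - s).toNat = 0 by omega]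
        split_ifs with h2 h3
        · exact absurd h3 (by omega)
        · rw [show (indiceF - (indiceI + c) + 1).toNat = 1 by omega]
          simp
        · exact absurd h2 (by omega)
      · -- collected, no break: keep collecting in sync
        rw [if_neg hb, ih (s + 1) (acc ++ [y]) (c + 1) (by omega)]
        rw [show (indiceI + (c + 1) - (s + 1)).toNat = 0 by omega,
            show (indiceI + c - s).toNat = 0 by omega]
        simp only [List.drop_zero]
        split_ifs <;>
          first
            | (exfalso; omega)
            | (rw [show (indiceF - (indiceI + c) + 1).toNat
                    = (indiceF - (indiceI + (c + 1)) + 1).toNat + 1 by omega,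
                  List.take_succ_cons]
               simp)
            | (simp; done)
            | (simp
               exact List.eq_nil_of_length_eq_zero (by omega))
    · -- skip this element: its index is below the looked-for one
      rw [if_neg (fun he => hm he), ih (s + 1) acc c (by omega)]
      have hdrop : List.drop (indiceI + c - (s + 1)).toNat rest
          = List.drop (indiceI + c - s).toNat (y :: rest) := by
        rw [show (indiceI + c - s).toNat = (indiceI + c - (s + 1)).toNat + 1 by omega,
            List.drop_succ_cons]
      split_ifs <;>
        first
          | rfl
          | (exfalso; omega)
          | rw [hdrop]

-- ===== VERDICT (by name: the statement is the Claim_ definition above) =====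
theorem subPalavra_spec : Claim_equal_subPalavra := by
  intro palavra indiceI indiceF _
  unfold Spec_subPalavra subPalavra subPalavra_alt
  have hlen : (palavra.length : Int) = (palavra.toList.length : Int) := by simp
  by_cases h0 : indiceI < 0
  · rw [loop_of_lt _ 0 _ _ _ _ (by omega), if_pos (Or.inl h0)]
  · rw [loop_of_le _ 0 _ _ _ _ (by omega)]
    split_ifs <;>
      first
        | rfl
        | (exfalso; omega)
        | (apply String.toList_inj.mp
           rw [PySem.Str.toList_slice]
           simp only [PySem.Chars.slice_eq_listSlice]
           rw [PySem.List.slice_from _ (show (0:Int) ≤ indiceI by omega),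
               show (indiceI + 0 - 0).toNat = indiceI.toNat by omega]
           simp)
        | (apply String.toList_inj.mp
           rw [PySem.Str.toList_slice]
           simp only [PySem.Chars.slice_eq_listSlice]
           rw [PySem.List.slice_toNat _ (by omega) (by omega),
               show (indiceF - (indiceI + 0) + 1).toNat
                  = (indiceF + 1).toNat - indiceI.toNat by omega,
               show (indiceI + 0 - 0).toNat = indiceI.toNat by omega]
           simp)
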